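-- pv_equiv track=rewrite | github.com/jxu/op-reject-rule | src/number.py | combo_max_product
-- ===== SOURCE A (Python) =====
-- def combo_max_product(X, terms, max_product):
--     '''Like itertools.combinations(X, terms) but only picks values whose
--     product is <= max_product.
--     '''
--     assert sorted(X) == X  # To keep track of index
--     result = []
--
--     def f(last_i, terms_so_far, product_):
--         if len(terms_so_far) == terms:
--             result.append(terms_so_far)
--             return
--
--         for i in range(last_i, len(X)):
--             new_product = product_ * X[i]
--             if new_product <= max_product:
--                 f(i+1, terms_so_far + [X[i]], new_product)
--             else:  # Product too large already
--                 break
--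
--     f(0, [], 1)
--     return result
-- ===== SOURCE B (Python) =====
-- def combo_max_product(X, terms, max_product):
--     '''Like itertools.combinations(X, terms) but only picks values whose
--     product is <= max_product.
--     '''
--     assert sorted(X) == X  # sorted input is the function's contract
--     # Breadth-first: grow all partial combinations level by level.
--     level = [(0, [], 1)]  # (next start index, terms so far, product so far)
--     for _ in range(terms):
--         if not level:
--             break
--         nxt = []
--         for last_i, combo, p in level:
--             for i in range(last_i, len(X)):
--                 np = p * X[i]
--                 if np > max_product:
--                     break
--                 nxt.append((i + 1, combo + [X[i]], np))
--         level = nxt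
--     return [combo for _, combo, _ in level]
-- ===== Notes on version B (the rewrite author's own statement) =====
-- stated objective: alternative
-- what changed: Replaces the recursive depth-first search with shared mutable result by an iterative breadth-first level expansion: a list of (start index, partial combination, product) frames is expanded `terms` times, keeping the per-frame prefix-product break.
-- outside the precondition, e.g. on combo_max_product([1, 2], -1, 10): A returns [], B returns [[]]
import Mathlib
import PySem

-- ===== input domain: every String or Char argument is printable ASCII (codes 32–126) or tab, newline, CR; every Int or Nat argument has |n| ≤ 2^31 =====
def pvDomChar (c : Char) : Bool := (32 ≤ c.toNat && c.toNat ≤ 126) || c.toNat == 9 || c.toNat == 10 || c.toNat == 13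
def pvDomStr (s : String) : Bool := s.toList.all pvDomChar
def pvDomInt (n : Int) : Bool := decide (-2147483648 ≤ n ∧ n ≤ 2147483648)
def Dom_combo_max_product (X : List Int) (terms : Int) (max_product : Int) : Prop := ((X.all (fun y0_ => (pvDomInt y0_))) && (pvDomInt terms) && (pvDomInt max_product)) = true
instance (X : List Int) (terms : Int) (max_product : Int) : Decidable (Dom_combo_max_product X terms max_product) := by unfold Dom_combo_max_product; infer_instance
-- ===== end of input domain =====

-- B replaces A's recursive DFS by an iterative breadth-first level expansion (alternative decomposition, same cost).

-- ===== PORT A =====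
-- A's inner recursive f, split as f (comboF) and its index loop (comboLoop); each call
-- returns the list of combinations it appends to A's shared `result` (preorder = append order).
mutual
def comboF (X : List Int) (terms : Int) (max_product : Int) (last_i : Nat) (acc : List Int) (p : Int) : List (List Int) :=
  if (acc.length : Int) = terms then [acc]
  else comboLoop X terms max_product acc p last_i
termination_by (X.length + 1 - last_i, 1)

def comboLoop (X : List Int) (terms : Int) (max_product : Int) (acc : List Int) (p : Int) (i : Nat) : List (List Int) :=
  if h : i < X.length then
    let new_product := p * X[i]
    if new_product ≤ max_product then
      comboF X terms max_product (i + 1) (acc ++ [X[i]]) new_product ++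
        comboLoop X terms max_product acc p (i + 1)
    else []  -- break
  else []
termination_by (X.length + 1 - i, 0)
end

def combo_max_product (X : List Int) (terms : Int) (max_product : Int) : List (List Int) :=
  -- `assert sorted(X) == X` raises on unsorted X: excluded by Pre_combo_max_product
  comboF X terms max_product 0 [] 1

-- ===== PORT B =====
-- inner `for i in range(last_i, len(X)) … break` of Source B: children of one frame
def childScan (X : List Int) (max_product : Int) (last_i : Nat) (combo : List Int) (p : Int) : List (Nat × List Int × Int) :=
  if h : last_i < X.length then
    let np := p * X[last_i]
    if np > max_product then []  -- break
    else (last_i + 1, combo ++ [X[last_i]], np) :: childScan X max_product (last_i + 1) combo p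
  else []
termination_by X.length - last_i

-- one level step: expand every frame of the level
def levelStep (X : List Int) (max_product : Int) (level : List (Nat × List Int × Int)) : List (Nat × List Int × Int) :=
  level.flatMap (fun f => childScan X max_product f.1 f.2.1 f.2.2)

-- Source B's `for _ in range(terms): if not level: break …`, as a countdown recursion
def levelsB (X : List Int) (max_product : Int) : Nat → List (Nat × List Int × Int) → List (Nat × List Int × Int)
  | 0, level => level
  | k + 1, level => if level = [] then level else levelsB X max_product k (levelStep X max_product level)

def combo_max_product_alt (X : List Int) (terms : Int) (max_product : Int) : List (List Int) :=
  (levelsB X max_product terms.toNat [(0, [], 1)]).map (fun f => f.2.1)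

-- ===== PRECONDITION & SPEC =====
-- Pre_ restricts to the natural domain: sorted X (A's `assert sorted(X) == X` raises
-- AssertionError otherwise) and a non-negative number of terms (on negative `terms`
-- A returns [], an input outside the natural domain of a combinations count).
def Pre_combo_max_product (X : List Int) (terms : Int) (max_product : Int) : Prop :=
  X.Pairwise (· ≤ ·) ∧ 0 ≤ terms
instance (X : List Int) (terms : Int) (max_product : Int) : Decidable (Pre_combo_max_product X terms max_product) := by unfold Pre_combo_max_product; infer_instance

def pvWitness_combo_max_product : List Int × Int × Int := ([1, 2, 3], 2, 6)

def Spec_combo_max_product (X : List Int) (terms : Int) (max_product : Int) (out : List (List Int)) : Prop := out = combo_max_product_alt X terms max_product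
instance (X : List Int) (terms : Int) (max_product : Int) (out : List (List Int)) : Decidable (Spec_combo_max_product X terms max_product out) := by unfold Spec_combo_max_product; infer_instance

-- ===== CLAIM (what is proved, stated in full; the proofs are below) =====
def Claim_equal_combo_max_product : Prop := ∀ (X : List Int) (terms : Int) (max_product : Int), Dom_combo_max_product X terms max_product → Pre_combo_max_product X terms max_product → Spec_combo_max_product X terms max_product (combo_max_product X terms max_product)

-- ===== LEMMAS AND PROOFS =====

-- k-fold level expansion, in the orientation of the proof
def stepIter (X : List Int) (max_product : Int) : Nat → List (Nat × List Int × Int) → List (Nat × List Int × Int)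
  | 0, l => l
  | k + 1, l => stepIter X max_product k (levelStep X max_product l)

theorem levelStep_append (X : List Int) (m : Int) (a b : List (Nat × List Int × Int)) :
    levelStep X m (a ++ b) = levelStep X m a ++ levelStep X m b := by
  simp [levelStep]

theorem stepIter_append (X : List Int) (m : Int) (k : Nat) (a b : List (Nat × List Int × Int)) :
    stepIter X m k (a ++ b) = stepIter X m k a ++ stepIter X m k b := by
  induction k generalizing a b with
  | zero => rfl
  | succ k ih => simp [stepIter, levelStep_append, ih]

theorem stepIter_nil (X : List Int) (m : Int) (k : Nat) : stepIter X m k [] = [] := by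
  induction k with
  | zero => rfl
  | succ k ih => simpa [stepIter, levelStep] using ih

theorem levelsB_eq_stepIter (X : List Int) (m : Int) (k : Nat) (l : List (Nat × List Int × Int)) :
    levelsB X m k l = stepIter X m k l := by
  induction k generalizing l with
  | zero => rfl
  | succ k ih =>
    by_cases hl : l = []
    · subst hl; simp [levelsB, stepIter, levelStep, stepIter_nil]
    · simp [levelsB, hl, stepIter, ih]

-- Main bridge: A's recursion at depth `k` below the target equals k further BFS levels.
theorem comboF_eq_stepIter (X : List Int) (max_product : Int) (k : Nat) :
    ∀ (last_i : Nat) (acc : List Int) (p : Int),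
      comboF X ((acc.length : Int) + k) max_product last_i acc p =
        (stepIter X max_product k [(last_i, acc, p)]).map (fun f => f.2.1) := by
  induction k with
  | zero =>
    intro last_i acc p
    rw [comboF.eq_def]
    simp [stepIter]
  | succ k ih =>
    -- loop lemma at this k, by downward induction on the remaining indices
    have loop : ∀ (fuel i : Nat), X.length ≤ i + fuel → ∀ (acc : List Int) (p : Int),
        comboLoop X ((acc.length : Int) + ((k + 1 : Nat) : Int)) max_product acc p i =
          (stepIter X max_product k (childScan X max_product i acc p)).map (fun f => f.2.1) := by
      intro fuel
      induction fuel with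
      | zero =>
        intro i hi acc p
        rw [comboLoop.eq_def, childScan]
        simp [Nat.not_lt.mpr (by omega : X.length ≤ i), stepIter_nil]
      | succ fuel ihf =>
        intro i hi acc p
        rw [comboLoop.eq_def, childScan]
        by_cases h : i < X.length
        · simp only [h, dif_pos]
          by_cases hp : p * X[i] ≤ max_product
          · have hnp : ¬ (p * X[i] > max_product) := by omega
            simp only [hp, hnp, if_true, if_false]
            have h1 : comboF X ((acc.length : Int) + ((k + 1 : Nat) : Int)) max_product (i + 1)
                (acc ++ [X[i]]) (p * X[i]) =
                (stepIter X max_product k [(i + 1, acc ++ [X[i]], p * X[i])]).map (fun f => f.2.1) := by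
              have he : ((acc.length : Int) + ((k + 1 : Nat) : Int)) =
                  (((acc ++ [X[i]]).length : Int) + (k : Int)) := by
                simp only [List.length_append, List.length_cons, List.length_nil]; push_cast; ring
              rw [he]
              exact ih (i + 1) (acc ++ [X[i]]) (p * X[i])
            rw [h1, ihf (i + 1) (by omega) acc p]
            have hcons : (i + 1, acc ++ [X[i]], p * X[i]) :: childScan X max_product (i + 1) acc p =
                [(i + 1, acc ++ [X[i]], p * X[i])] ++ childScan X max_product (i + 1) acc p := rfl
            rw [hcons, stepIter_append, List.map_append]
          · have hnp : p * X[i] > max_product := by omega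
            simp [hp, hnp, stepIter_nil]
        · simp [h, stepIter_nil]
    intro last_i acc p
    rw [comboF.eq_def]
    have hne : ¬ ((acc.length : Int) = (acc.length : Int) + (k + 1 : Nat)) := by
      push_cast; omega
    rw [if_neg hne]
    have := loop X.length last_i (by omega) acc p
    rw [this]
    -- stepIter (k+1) [(last_i, acc, p)] = stepIter k (childScan …)
    have hstep : levelStep X max_product [(last_i, acc, p)] = childScan X max_product last_i acc p := by
      simp [levelStep]
    simp [stepIter, hstep]

-- ===== VERDICT (by name: the statement is the Claim_ definition above) =====
theorem combo_max_product_spec : Claim_equal_combo_max_product := by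
  intro X terms max_product _hdom hpre
  unfold Spec_combo_max_product combo_max_product combo_max_product_alt
  have hterms : terms = ((([] : List Int).length : Int) + terms.toNat) := by
    simp [Int.toNat_of_nonneg hpre.2]
  conv_lhs => rw [hterms]
  rw [comboF_eq_stepIter, levelsB_eq_stepIter]
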